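-- pv_equiv track=rewrite | github.com/TakaIshikawa/blueprint | src/blueprint/task_data_anonymization_readiness.py | _required_safeguards
-- ===== SOURCE A (Python) =====
-- from typing import Any, Iterable, Literal, Mapping, TypeVar
--
-- DataAnonymizationTransform = Literal[
--     "anonymization",
--     "pseudonymization",
--     "hashing",
--     "tokenization",
--     "de_identification",
--     "redaction",
--     "test_data_generation",
--     "privacy_safe_logs",
--     "analytics_dataset",
--     "anonymized_export",
-- ]
--
-- DataAnonymizationSafeguard = Literal[
--     "reidentification_risk_review",
--     "irreversible_transform",
--     "salt_key_management",
--     "field_inventory",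
--     "sampling_policy",
--     "downstream_contract",
--     "retention_window",
--     "validation_fixture",
-- ]
--
-- _SAFEGUARD_ORDER: tuple[DataAnonymizationSafeguard, ...] = (
--     "reidentification_risk_review",
--     "irreversible_transform",
--     "salt_key_management",
--     "field_inventory",
--     "sampling_policy",
--     "downstream_contract",
--     "retention_window",
--     "validation_fixture",
-- )
--
-- def _required_safeguards(
--     transforms: tuple[DataAnonymizationTransform, ...],
--     surfaces: tuple[str, ...],
-- ) -> tuple[DataAnonymizationSafeguard, ...]:
--     required: set[DataAnonymizationSafeguard] = {
--         "reidentification_risk_review",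
--         "field_inventory",
--         "retention_window",
--         "validation_fixture",
--     }
--     if any(
--         transform in transforms
--         for transform in ("anonymization", "hashing", "de_identification", "redaction")
--     ):
--         required.add("irreversible_transform")
--     if any(
--         transform in transforms for transform in ("hashing", "tokenization", "pseudonymization")
--     ):
--         required.update({"salt_key_management", "downstream_contract"})
--     if any(transform in transforms for transform in ("analytics_dataset", "anonymized_export")):
--         required.update({"sampling_policy", "downstream_contract"})
--     if any(
--         surface in surfaces
--         for surface in ("analytics dataset", "reports", "sharing dataset", "data warehouse")
--     ):
--         required.add("sampling_policy")
--     if any(surface in surfaces for surface in ("exports", "sharing dataset")):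
--         required.add("downstream_contract")
--     return tuple(safeguard for safeguard in _SAFEGUARD_ORDER if safeguard in required)
-- ===== SOURCE B (Python) =====
-- _SAFEGUARD_ORDER = (
--     "reidentification_risk_review",
--     "irreversible_transform",
--     "salt_key_management",
--     "field_inventory",
--     "sampling_policy",
--     "downstream_contract",
--     "retention_window",
--     "validation_fixture",
-- )
--
-- # Inverted index: each input VALUE maps directly to the safeguards it induces
-- # (the transpose of A's per-safeguard trigger sets).
-- _TRANSFORM_SAFEGUARDS = {
--     "anonymization": ("irreversible_transform",),
--     "hashing": ("irreversible_transform", "salt_key_management", "downstream_contract"),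
--     "de_identification": ("irreversible_transform",),
--     "redaction": ("irreversible_transform",),
--     "tokenization": ("salt_key_management", "downstream_contract"),
--     "pseudonymization": ("salt_key_management", "downstream_contract"),
--     "analytics_dataset": ("sampling_policy", "downstream_contract"),
--     "anonymized_export": ("sampling_policy", "downstream_contract"),
-- }
--
-- _SURFACE_SAFEGUARDS = {
--     "analytics dataset": ("sampling_policy",),
--     "reports": ("sampling_policy",),
--     "sharing dataset": ("sampling_policy", "downstream_contract"),
--     "data warehouse": ("sampling_policy",),
--     "exports": ("downstream_contract",),
-- }
--
--
-- def _required_safeguards(transforms, surfaces):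
--     required = {
--         "reidentification_risk_review",
--         "field_inventory",
--         "retention_window",
--         "validation_fixture",
--     }
--     for transform in transforms:
--         required.update(_TRANSFORM_SAFEGUARDS.get(transform, ()))
--     for surface in surfaces:
--         required.update(_SURFACE_SAFEGUARDS.get(surface, ()))
--     return tuple(s for s in _SAFEGUARD_ORDER if s in required)
-- ===== Notes on version B (the rewrite author's own statement) =====
-- stated objective: alternative
-- what changed: Replaces A's five per-safeguard trigger-membership tests with the transposed inverted index (input value -> safeguards it induces) consumed by a single pass over the input values with a dict lookup per element.
import Mathlib
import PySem

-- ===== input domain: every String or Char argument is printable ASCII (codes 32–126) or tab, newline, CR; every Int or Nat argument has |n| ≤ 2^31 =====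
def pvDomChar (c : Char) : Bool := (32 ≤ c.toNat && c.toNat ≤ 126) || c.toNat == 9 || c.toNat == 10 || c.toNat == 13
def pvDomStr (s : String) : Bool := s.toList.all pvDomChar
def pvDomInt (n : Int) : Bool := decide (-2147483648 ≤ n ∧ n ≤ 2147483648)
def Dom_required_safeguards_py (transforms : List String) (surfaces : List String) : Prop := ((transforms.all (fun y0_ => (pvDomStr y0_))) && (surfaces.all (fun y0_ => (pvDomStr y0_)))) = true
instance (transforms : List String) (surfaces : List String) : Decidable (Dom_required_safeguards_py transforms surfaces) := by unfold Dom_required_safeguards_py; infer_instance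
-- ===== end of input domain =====

-- B replaces A's per-safeguard trigger tests with an inverted index (input value → safeguards)
-- consumed by a single pass over the input values (objective: alternative).

-- ===== PORT A =====
def pvSafeguardOrder : List String :=
  ["reidentification_risk_review", "irreversible_transform", "salt_key_management",
   "field_inventory", "sampling_policy", "downstream_contract", "retention_window",
   "validation_fixture"]

def required_safeguards_py (transforms : List String) (surfaces : List String) : List String :=
  let required : PySem.Set String := PySem.Set.ofList
    ["reidentification_risk_review", "field_inventory", "retention_window", "validation_fixture"]
  let required := if ["anonymization", "hashing", "de_identification", "redaction"].any
      (fun transform => transforms.contains transform)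
    then PySem.Set.add required "irreversible_transform" else required
  let required := if ["hashing", "tokenization", "pseudonymization"].any
      (fun transform => transforms.contains transform)
    then PySem.Set.update required ["salt_key_management", "downstream_contract"] else required
  let required := if ["analytics_dataset", "anonymized_export"].any
      (fun transform => transforms.contains transform)
    then PySem.Set.update required ["sampling_policy", "downstream_contract"] else required
  let required := if ["analytics dataset", "reports", "sharing dataset", "data warehouse"].any
      (fun surface => surfaces.contains surface)
    then PySem.Set.add required "sampling_policy" else required
  let required := if ["exports", "sharing dataset"].any
      (fun surface => surfaces.contains surface)
    then PySem.Set.add required "downstream_contract" else required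
  pvSafeguardOrder.filter (fun safeguard => PySem.Set.contains required safeguard)

-- ===== PORT B =====
-- inverted index: input value → safeguards it induces
def pvTransformSafeguards : PySem.Dict String (List String) := PySem.Dict.ofList
  [ ("anonymization", ["irreversible_transform"]),
    ("hashing", ["irreversible_transform", "salt_key_management", "downstream_contract"]),
    ("de_identification", ["irreversible_transform"]),
    ("redaction", ["irreversible_transform"]),
    ("tokenization", ["salt_key_management", "downstream_contract"]),
    ("pseudonymization", ["salt_key_management", "downstream_contract"]),
    ("analytics_dataset", ["sampling_policy", "downstream_contract"]),
    ("anonymized_export", ["sampling_policy", "downstream_contract"]) ]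

def pvSurfaceSafeguards : PySem.Dict String (List String) := PySem.Dict.ofList
  [ ("analytics dataset", ["sampling_policy"]),
    ("reports", ["sampling_policy"]),
    ("sharing dataset", ["sampling_policy", "downstream_contract"]),
    ("data warehouse", ["sampling_policy"]),
    ("exports", ["downstream_contract"]) ]

def required_safeguards_py_alt (transforms : List String) (surfaces : List String) : List String :=
  let required : PySem.Set String := PySem.Set.ofList
    ["reidentification_risk_review", "field_inventory", "retention_window", "validation_fixture"]
  let required := transforms.foldl
    (fun required transform => PySem.Set.update required (pvTransformSafeguards.getD transform [])) required
  let required := surfaces.foldl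
    (fun required surface => PySem.Set.update required (pvSurfaceSafeguards.getD surface [])) required
  pvSafeguardOrder.filter (fun safeguard => PySem.Set.contains required safeguard)

-- ===== PRECONDITION & SPEC =====
def Spec_required_safeguards_py (transforms : List String) (surfaces : List String) (out : List String) : Prop := out = required_safeguards_py_alt transforms surfaces
instance (transforms : List String) (surfaces : List String) (out : List String) : Decidable (Spec_required_safeguards_py transforms surfaces out) := by unfold Spec_required_safeguards_py; infer_instance

-- ===== CLAIM (what is proved, stated in full; the proofs are below) =====
def Claim_equal_required_safeguards_py : Prop := ∀ (transforms : List String) (surfaces : List String), Dom_required_safeguards_py transforms surfaces → Spec_required_safeguards_py transforms surfaces (required_safeguards_py transforms surfaces)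

-- ===== LEMMAS AND PROOFS =====

-- the literal inverted-index dicts in Dict.mk normal form (keys are distinct)
theorem pv_tmap_mk : pvTransformSafeguards = PySem.Dict.mk
  [ ("anonymization", ["irreversible_transform"]),
    ("hashing", ["irreversible_transform", "salt_key_management", "downstream_contract"]),
    ("de_identification", ["irreversible_transform"]),
    ("redaction", ["irreversible_transform"]),
    ("tokenization", ["salt_key_management", "downstream_contract"]),
    ("pseudonymization", ["salt_key_management", "downstream_contract"]),
    ("analytics_dataset", ["sampling_policy", "downstream_contract"]),
    ("anonymized_export", ["sampling_policy", "downstream_contract"]) ] := by decide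

theorem pv_smap_mk : pvSurfaceSafeguards = PySem.Dict.mk
  [ ("analytics dataset", ["sampling_policy"]),
    ("reports", ["sampling_policy"]),
    ("sharing dataset", ["sampling_policy", "downstream_contract"]),
    ("data warehouse", ["sampling_policy"]),
    ("exports", ["downstream_contract"]) ] := by decide

-- characterisation of a lookup in the transform index
theorem pv_tmap_mem (x y : String) : y ∈ pvTransformSafeguards.getD x [] ↔
    (y = "irreversible_transform" ∧ (x = "anonymization" ∨ x = "hashing" ∨ x = "de_identification" ∨ x = "redaction")) ∨
    (y = "salt_key_management" ∧ (x = "hashing" ∨ x = "tokenization" ∨ x = "pseudonymization")) ∨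
    (y = "sampling_policy" ∧ (x = "analytics_dataset" ∨ x = "anonymized_export")) ∨
    (y = "downstream_contract" ∧ (x = "hashing" ∨ x = "tokenization" ∨ x = "pseudonymization" ∨ x = "analytics_dataset" ∨ x = "anonymized_export")) := by
  rw [pv_tmap_mk]
  simp only [PySem.Dict.getD, PySem.Dict.get?_mk_cons]
  split_ifs <;> simp only [beq_iff_eq] at * <;> try subst x
  all_goals try simp_all
  all_goals tauto

-- characterisation of a lookup in the surface index
theorem pv_smap_mem (x y : String) : y ∈ pvSurfaceSafeguards.getD x [] ↔
    (y = "sampling_policy" ∧ (x = "analytics dataset" ∨ x = "reports" ∨ x = "sharing dataset" ∨ x = "data warehouse")) ∨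
    (y = "downstream_contract" ∧ (x = "exports" ∨ x = "sharing dataset")) := by
  rw [pv_smap_mk]
  simp only [PySem.Dict.getD, PySem.Dict.get?_mk_cons]
  split_ifs <;> simp only [beq_iff_eq] at * <;> try subst x
  all_goals try simp_all
  all_goals tauto

-- membership in B's one-pass fold of inverted-index updates
theorem pv_mem_foldl_update {m : String → List String} {xs : List String}
    {s : PySem.Set String} {y : String} :
    (y ∈ xs.foldl (fun r x => PySem.Set.update r (m x)) s) ↔ (y ∈ s ∨ ∃ x ∈ xs, y ∈ m x) := by
  induction xs generalizing s with
  | nil => simp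
  | cons a as ih => simp [List.foldl, ih, PySem.Set.mem_update]; tauto

-- membership through A's conditional add / update, without case explosion
theorem pv_mem_ite_add {c : Bool} {s : PySem.Set String} {v y : String} :
    (y ∈ (if c then PySem.Set.add s v else s)) ↔ (y ∈ s ∨ (c = true ∧ y = v)) := by
  cases c <;> simp [PySem.Set.mem_add]

theorem pv_mem_ite_update {c : Bool} {s : PySem.Set String} {l : List String} {y : String} :
    (y ∈ (if c then PySem.Set.update s l else s)) ↔ (y ∈ s ∨ (c = true ∧ y ∈ l)) := by
  cases c <;> simp [PySem.Set.mem_update]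

-- ===== VERDICT (by name: the statement is the Claim_ definition above) =====
theorem required_safeguards_py_spec : Claim_equal_required_safeguards_py := by
  intro transforms surfaces _
  unfold Spec_required_safeguards_py required_safeguards_py required_safeguards_py_alt
  apply List.filter_congr
  intro g hg
  simp only [PySem.Set.contains_eq_listContains, List.contains_eq_mem, decide_eq_decide]
  rw [pv_mem_foldl_update, pv_mem_foldl_update]
  simp only [pv_mem_ite_add, pv_mem_ite_update, PySem.Set.mem_ofList]
  simp only [pv_tmap_mem, pv_smap_mem, List.any_cons, List.any_nil, Bool.or_eq_true,
    Bool.false_eq_true, decide_eq_true_eq, List.mem_cons, List.not_mem_nil, or_false]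
  simp only [pvSafeguardOrder, List.mem_cons, List.not_mem_nil, or_false] at hg
  rcases hg with rfl | rfl | rfl | rfl | rfl | rfl | rfl | rfl <;>
    (simp [and_or_left, exists_or]; try tauto)
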